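-- pv_equiv track=rewrite | github.com/MaximilianoRuizDiaz/tarea-programacion-ruiz-diaz | ejercicio10.py | son_vectores_independientes
-- ===== SOURCE A (Python) =====
-- def son_vectores_independientes(lista_vectores):
--     for v in lista_vectores:
--         if all(x == 0 for x in v):  # vector nulo
--             return False
--     for i in range(len(lista_vectores)):
--         for j in range(i+1, len(lista_vectores)):
--             if lista_vectores[i] == lista_vectores[j]:  # repetido
--                 return False
--     return True
-- ===== SOURCE B (Python) =====
-- def son_vectores_independientes(lista_vectores):
--     seen = set()
--     for v in lista_vectores:
--         if all(x == 0 for x in v):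
--             return False
--         t = tuple(v)
--         if t in seen:
--             return False
--         seen.add(t)
--     return True
-- ===== Notes on version B (the rewrite author's own statement) =====
-- stated objective: simpler
-- what changed: Merges A's separate null-vector pass and nested index-pair duplicate scan into one single pass that checks each vector for null-ness and for membership in a set of already-seen vectors.
import Mathlib
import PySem

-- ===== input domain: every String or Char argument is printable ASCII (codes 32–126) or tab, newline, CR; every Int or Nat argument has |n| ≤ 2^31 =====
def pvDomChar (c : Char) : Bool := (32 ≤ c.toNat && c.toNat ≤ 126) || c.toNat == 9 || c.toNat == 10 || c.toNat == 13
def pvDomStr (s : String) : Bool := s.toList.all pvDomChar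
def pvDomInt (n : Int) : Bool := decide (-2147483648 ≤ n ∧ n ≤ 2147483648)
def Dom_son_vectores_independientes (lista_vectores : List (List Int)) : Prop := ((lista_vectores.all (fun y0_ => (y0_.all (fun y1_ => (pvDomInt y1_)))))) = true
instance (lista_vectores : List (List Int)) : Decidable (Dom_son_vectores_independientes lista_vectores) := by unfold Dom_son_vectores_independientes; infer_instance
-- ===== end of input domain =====

-- B merges A's null-vector pass and nested duplicate scan into a single pass over a set of seen vectors (objective: simpler); return values proved equal.

-- ===== PORT A =====
-- second loop of A: for i in range(n): for j in range(i+1, n): if L[i] == L[j]: return False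
def pvADup (lista_vectores : List (List Int)) : Bool :=
  (PySem.List.pyRange 0 (lista_vectores.length : Int)).any (fun i =>
    (PySem.List.pyRange (i + 1) (lista_vectores.length : Int)).any (fun j =>
      PySem.List.pyGet? lista_vectores i == PySem.List.pyGet? lista_vectores j))

def son_vectores_independientes (lista_vectores : List (List Int)) : Bool :=
  -- first loop: early return False on a null vector
  if lista_vectores.any (fun v => v.all (fun x => x == 0)) then false
  -- second loop: early return False on a repeated vector
  else if pvADup lista_vectores then false
  else true

-- ===== PORT B =====
-- single pass: null check, then membership in the seen-set, then add and recurse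
def pvBLoop : List (List Int) → PySem.Set (List Int) → Bool
  | [], _ => true
  | v :: rest, seen =>
    if v.all (fun x => x == 0) then false
    else if PySem.Set.contains seen v then false
    else pvBLoop rest (PySem.Set.add seen v)

def son_vectores_independientes_alt (lista_vectores : List (List Int)) : Bool :=
  pvBLoop lista_vectores PySem.Set.empty

-- ===== PRECONDITION & SPEC =====
def Spec_son_vectores_independientes (lista_vectores : List (List Int)) (out : Bool) : Prop := out = son_vectores_independientes_alt lista_vectores
instance (lista_vectores : List (List Int)) (out : Bool) : Decidable (Spec_son_vectores_independientes lista_vectores out) := by unfold Spec_son_vectores_independientes; infer_instance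

-- ===== CLAIM (what is proved, stated in full; the proofs are below) =====
def Claim_equal_son_vectores_independientes : Prop := ∀ (lista_vectores : List (List Int)), Dom_son_vectores_independientes lista_vectores → Spec_son_vectores_independientes lista_vectores (son_vectores_independientes lista_vectores)

-- ===== LEMMAS AND PROOFS =====

-- A's nested index scan detects exactly non-Nodup lists
theorem pvADup_eq_true_iff (L : List (List Int)) : pvADup L = true ↔ ¬ L.Nodup := by
  unfold pvADup
  rw [List.nodup_iff_getElem?_ne_getElem?]
  push Not
  simp only [List.any_eq_true]
  constructor
  · rintro ⟨i, hi, j, hj, hij⟩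
    rw [PySem.List.mem_pyRange_one] at hi hj
    refine ⟨i.toNat, j.toNat, by omega, by omega, ?_⟩
    rw [PySem.List.pyGet?_of_nonneg_of_lt L (by omega) (by omega),
        PySem.List.pyGet?_of_nonneg_of_lt L (by omega) (by omega)] at hij
    exact eq_of_beq hij
  · rintro ⟨i, j, hij, hj, heq⟩
    refine ⟨(i : Int), ?_, (j : Int), ?_, ?_⟩
    · rw [PySem.List.mem_pyRange_one]; constructor <;> [positivity; exact_mod_cast by omega]
    · rw [PySem.List.mem_pyRange_one]; constructor <;> [omega; exact_mod_cast hj]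
    · rw [PySem.List.pyGet?_natCast, PySem.List.pyGet?_natCast]
      exact beq_iff_eq.mpr heq

-- invariant of B's single pass
theorem pvBLoop_eq_true_iff (L : List (List Int)) : ∀ (seen : PySem.Set (List Int)),
    pvBLoop L seen = true ↔
      ((∀ v ∈ L, v.all (fun x => x == 0) = false) ∧ L.Nodup ∧ ∀ v ∈ L, v ∉ seen) := by
  induction L with
  | nil => intro seen; simp [pvBLoop]
  | cons v rest ih =>
    intro seen
    simp only [pvBLoop, List.nodup_cons, List.mem_cons]
    split_ifs with hnull hmem
    · simp only [false_iff]
      rintro ⟨h, -⟩; exact absurd (h v (Or.inl rfl)) (by simp [hnull])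
    · rw [PySem.Set.contains_iff] at hmem
      simp only [false_iff]
      rintro ⟨-, -, h⟩; exact h v (Or.inl rfl) hmem
    · rw [ih]
      have hm : ∀ w, w ∈ PySem.Set.add seen v ↔ w ∈ seen ∨ w = v := fun w => PySem.Set.mem_add seen v w
      rw [PySem.Set.contains_iff] at hmem
      constructor
      · rintro ⟨h1, h2, h3⟩
        have hv : v ∉ rest := fun hv => h3 v hv ((hm v).mpr (Or.inr rfl))
        refine ⟨?_, ⟨hv, h2⟩, ?_⟩
        · rintro w (rfl | hw)
          · exact Bool.eq_false_iff.mpr hnull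
          · exact h1 w hw
        · rintro w (rfl | hw)
          · exact hmem
          · exact fun hws => h3 w hw ((hm w).mpr (Or.inl hws))
      · rintro ⟨h1, ⟨hv, h2⟩, h3⟩
        refine ⟨fun w hw => h1 w (Or.inr hw), h2, ?_⟩
        intro w hw hws
        rcases (hm w).mp hws with h | rfl
        · exact h3 w (Or.inr hw) h
        · exact hv hw

-- ===== VERDICT (by name: the statement is the Claim_ definition above) =====
theorem son_vectores_independientes_spec : Claim_equal_son_vectores_independientes := by
  intro L _
  unfold Spec_son_vectores_independientes son_vectores_independientes son_vectores_independientes_alt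
  have hA : (if L.any (fun v => v.all (fun x => x == 0)) then false
      else if pvADup L then false else true) = true ↔
      ((∀ v ∈ L, v.all (fun x => x == 0) = false) ∧ L.Nodup) := by
    split_ifs with h1 h2
    · simp only [false_iff]
      rw [List.any_eq_true] at h1
      rintro ⟨h, -⟩
      obtain ⟨v, hv, hnull⟩ := h1
      exact absurd (h v hv) (by simp [hnull])
    · simp only [false_iff]
      rintro ⟨-, hnd⟩
      exact (pvADup_eq_true_iff L).mp h2 hnd
    · simp only [true_iff]
      refine ⟨?_, by_contra fun h => h2 ((pvADup_eq_true_iff L).mpr h)⟩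
      intro v hv
      exact Bool.eq_false_iff.mpr (fun hc => h1 (List.any_eq_true.mpr ⟨v, hv, hc⟩))
  have hB : pvBLoop L PySem.Set.empty = true ↔
      ((∀ v ∈ L, v.all (fun x => x == 0) = false) ∧ L.Nodup) := by
    rw [pvBLoop_eq_true_iff]
    simp [PySem.Set.empty]
  rw [Bool.eq_iff_iff, hA, hB]
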